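-- pv_equiv track=rewrite | github.com/Akmetari/GALabirynth | model/Labirynth.py | checkOnlyAcceptableSigns
-- ===== SOURCE A (Python) =====
-- WALL=9
--
-- EMPTY=0
--
-- START=5
--
-- END=8
--
-- def checkOnlyAcceptableSigns(matrix: list[list[int]]):
--     goodSigns=True
--     for row in matrix:
--         for a in row:
--             goodSigns=goodSigns and (a==EMPTY or a==WALL or a==START or a==END)
--             if not goodSigns:
--                 return False
--
--     return goodSigns
-- ===== SOURCE B (Python) =====
-- WALL=9
--
-- EMPTY=0
--
-- START=5
--
-- END=8
--
-- def checkOnlyAcceptableSigns(matrix: list[list[int]]):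
--     flat = [a for row in matrix for a in row]
--     return sum(flat.count(s) for s in (EMPTY, WALL, START, END)) == len(flat)
-- ===== Notes on version B (the rewrite author's own statement) =====
-- stated objective: alternative
-- what changed: Replaces the per-cell membership test with early return by a counting argument: flatten the matrix, count the occurrences of each of the four allowed symbols, and return whether those counts sum to the total number of cells (correct because the four symbols are distinct, so every allowed cell is counted exactly once and a forbidden cell never).
import Mathlib
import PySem

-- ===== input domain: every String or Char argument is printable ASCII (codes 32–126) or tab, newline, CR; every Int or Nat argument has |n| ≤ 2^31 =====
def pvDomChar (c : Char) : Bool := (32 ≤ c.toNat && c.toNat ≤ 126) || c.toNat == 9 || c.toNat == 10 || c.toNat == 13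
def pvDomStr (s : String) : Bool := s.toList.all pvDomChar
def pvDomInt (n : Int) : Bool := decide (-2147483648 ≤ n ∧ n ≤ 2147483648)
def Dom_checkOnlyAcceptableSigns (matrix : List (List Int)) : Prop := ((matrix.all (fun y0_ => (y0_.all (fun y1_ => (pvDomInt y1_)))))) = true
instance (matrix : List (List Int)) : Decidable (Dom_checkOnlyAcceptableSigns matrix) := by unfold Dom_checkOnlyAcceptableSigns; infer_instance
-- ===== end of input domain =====

-- B replaces A's per-cell membership loop with early return by a counting argument:
-- flatten, count each allowed symbol, and compare the sum of counts with the cell count.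

-- ===== PORT A =====
-- the per-cell acceptability test 'a==EMPTY or a==WALL or a==START or a==END'
def pvOK (a : Int) : Bool := a == 0 || a == 9 || a == 5 || a == 8

-- inner 'for a in row' loop; none = the early 'return False' fired
def pvRowLoopA (goodSigns : Bool) : List Int → Option Bool
  | [] => some goodSigns
  | a :: rest =>
      let g := goodSigns && pvOK a
      if !g then none else pvRowLoopA g rest

-- outer 'for row in matrix' loop
def pvMatLoopA (goodSigns : Bool) : List (List Int) → Bool
  | [] => goodSigns
  | row :: rows =>
      match pvRowLoopA goodSigns row with
      | none => false
      | some g => pvMatLoopA g rows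

def checkOnlyAcceptableSigns (matrix : List (List Int)) : Bool :=
  pvMatLoopA true matrix

-- ===== PORT B =====
def checkOnlyAcceptableSigns_alt (matrix : List (List Int)) : Bool :=
  let flat := matrix.flatMap (fun row => row)
  -- sum(flat.count(s) for s in (EMPTY, WALL, START, END)) == len(flat)
  (([(0 : Int), 9, 5, 8].map (fun s => PySem.List.count flat s)).sum) == flat.length

-- ===== PRECONDITION & SPEC =====
def Spec_checkOnlyAcceptableSigns (matrix : List (List Int)) (out : Bool) : Prop := out = checkOnlyAcceptableSigns_alt matrix
instance (matrix : List (List Int)) (out : Bool) : Decidable (Spec_checkOnlyAcceptableSigns matrix out) := by unfold Spec_checkOnlyAcceptableSigns; infer_instance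

-- ===== CLAIM (what is proved, stated in full; the proofs are below) =====
def Claim_equal_checkOnlyAcceptableSigns : Prop := ∀ (matrix : List (List Int)), Dom_checkOnlyAcceptableSigns matrix → Spec_checkOnlyAcceptableSigns matrix (checkOnlyAcceptableSigns matrix)

-- ===== LEMMAS AND PROOFS =====
theorem pvRowLoopA_true (row : List Int) :
    pvRowLoopA true row = if row.all pvOK then some true else none := by
  induction row with
  | nil => simp [pvRowLoopA]
  | cons a rest ih => cases h : pvOK a <;> simp [pvRowLoopA, h, ih]

theorem pvMatLoopA_true (rows : List (List Int)) :
    pvMatLoopA true rows = rows.all (fun r => r.all pvOK) := by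
  induction rows with
  | nil => rfl
  | cons r rs ih =>
      by_cases h : r.all pvOK
      · simp [pvMatLoopA, pvRowLoopA_true, h, ih]
      · simp [pvMatLoopA, pvRowLoopA_true, h]

-- the four counts sum to the number of cells passing the membership test
theorem pvCountSum (l : List Int) :
    PySem.List.count l 0 + PySem.List.count l 9 + PySem.List.count l 5 + PySem.List.count l 8
      = l.countP pvOK := by
  induction l with
  | nil => rfl
  | cons a rest ih =>
      simp only [PySem.List.count, List.count_cons, List.countP_cons, pvOK] at *
      by_cases h0 : a = 0 <;> by_cases h9 : a = 9 <;> by_cases h5 : a = 5 <;> by_cases h8 : a = 8 <;>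
        simp_all <;> omega

theorem pvAlt_all (matrix : List (List Int)) :
    checkOnlyAcceptableSigns_alt matrix = matrix.all (fun r => r.all pvOK) := by
  unfold checkOnlyAcceptableSigns_alt
  have h : (([(0 : Int), 9, 5, 8].map (fun s => PySem.List.count (matrix.flatMap (fun row => row)) s)).sum)
      = (matrix.flatMap (fun row => row)).countP pvOK := by
    have := pvCountSum (matrix.flatMap (fun row => row))
    simp only [List.map, List.sum_cons, List.sum_nil]
    omega
  simp only [h]
  rw [Bool.eq_iff_iff, beq_iff_eq, List.countP_eq_length]
  simp only [List.all_eq_true]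
  constructor
  · intro h r hr a ha
    exact h a (List.mem_flatMap.mpr ⟨r, hr, ha⟩)
  · intro h a ha
    obtain ⟨r, hr, ha⟩ := List.mem_flatMap.mp ha
    exact h r hr a ha

-- ===== VERDICT (by name: the statement is the Claim_ definition above) =====
theorem checkOnlyAcceptableSigns_spec : Claim_equal_checkOnlyAcceptableSigns := by
  intro matrix _
  show checkOnlyAcceptableSigns matrix = checkOnlyAcceptableSigns_alt matrix
  rw [pvAlt_all]
  unfold checkOnlyAcceptableSigns
  exact pvMatLoopA_true matrix
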